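-- pv_equiv track=rewrite | github.com/ccc53021/quasidifferential-gift | gift-64/quasidifferential_search_and_get_key_space_with_multiple_differential.py | vector_inner_product
-- ===== SOURCE A (Python) =====
-- def vector_inner_product(u, v, x, fx, n, m):
--     left = 0
--     for i in range(n):
--         left += ((u >> i) & 0x1) * ((x >> i) & 0x1)
--     left = left % 2
--     right = 0
--     for j in range(m):
--         right += ((v >> j) & 0x1) * ((fx >> j) & 0x1)
--     right = right % 2
--
--     return left ^ right
-- ===== SOURCE B (Python) =====
-- def vector_inner_product(u, v, x, fx, n, m):
--     left = (u & x & ((1 << max(n, 0)) - 1)).bit_count() % 2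
--     right = (v & fx & ((1 << max(m, 0)) - 1)).bit_count() % 2
--     return left ^ right
-- ===== Notes on version B (the rewrite author's own statement) =====
-- stated objective: faster
-- what changed: Replaces the two per-bit accumulation loops by closed-form popcount parities: each side becomes (u & x & mask).bit_count() % 2 over the masked AND, instead of iterating over every bit index.
import Mathlib
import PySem

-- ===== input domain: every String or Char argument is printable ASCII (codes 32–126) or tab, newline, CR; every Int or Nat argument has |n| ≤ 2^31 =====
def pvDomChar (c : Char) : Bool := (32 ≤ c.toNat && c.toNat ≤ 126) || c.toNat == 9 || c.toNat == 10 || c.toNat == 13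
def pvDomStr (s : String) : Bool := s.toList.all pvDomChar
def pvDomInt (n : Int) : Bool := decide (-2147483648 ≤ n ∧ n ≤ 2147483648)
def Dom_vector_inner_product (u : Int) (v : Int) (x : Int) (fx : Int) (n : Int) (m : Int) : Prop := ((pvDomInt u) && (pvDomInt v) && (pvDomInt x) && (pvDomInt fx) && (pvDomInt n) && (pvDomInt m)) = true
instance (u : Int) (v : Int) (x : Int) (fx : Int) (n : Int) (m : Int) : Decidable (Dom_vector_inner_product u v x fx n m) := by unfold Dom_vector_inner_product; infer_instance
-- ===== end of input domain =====

-- B replaces A's per-bit accumulation loops by popcount parities of the masked bitwise AND (measurably faster: one word-level popcount per side instead of one Python-level iteration per bit).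


-- ===== PORT A =====
def vector_inner_product (u : Int) (v : Int) (x : Int) (fx : Int) (n : Int) (m : Int) : Int :=
  let left : Int := (PySem.List.pyRange 0 n 1).foldl
    (fun acc i => acc + PySem.Int.band (u >>> i.toNat) 1 * PySem.Int.band (x >>> i.toNat) 1) 0
  let left : Int := PySem.Int.mod left 2
  let right : Int := (PySem.List.pyRange 0 m 1).foldl
    (fun acc j => acc + PySem.Int.band (v >>> j.toNat) 1 * PySem.Int.band (fx >>> j.toNat) 1) 0
  let right : Int := PySem.Int.mod right 2
  PySem.Int.bxor left right

-- ===== PORT B =====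
def vector_inner_product_alt (u : Int) (v : Int) (x : Int) (fx : Int) (n : Int) (m : Int) : Int :=
  let left : Int := PySem.Int.mod (PySem.Int.bitCount (PySem.Int.band (PySem.Int.band u x) ((1 <<< (max n 0).toNat) - 1)) : Int) 2
  let right : Int := PySem.Int.mod (PySem.Int.bitCount (PySem.Int.band (PySem.Int.band v fx) ((1 <<< (max m 0).toNat) - 1)) : Int) 2
  PySem.Int.bxor left right

-- ===== PRECONDITION & SPEC =====
def Spec_vector_inner_product (u : Int) (v : Int) (x : Int) (fx : Int) (n : Int) (m : Int) (out : Int) : Prop := out = vector_inner_product_alt u v x fx n m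
instance (u : Int) (v : Int) (x : Int) (fx : Int) (n : Int) (m : Int) (out : Int) : Decidable (Spec_vector_inner_product u v x fx n m out) := by unfold Spec_vector_inner_product; infer_instance

-- ===== CLAIM (what is proved, stated in full; the proofs are below) =====
def Claim_equal_vector_inner_product : Prop := ∀ (u : Int) (v : Int) (x : Int) (fx : Int) (n : Int) (m : Int), Dom_vector_inner_product u v x fx n m → Spec_vector_inner_product u v x fx n m (vector_inner_product u v x fx n m)

-- ===== LEMMAS AND PROOFS =====

-- Nat halving/parity facts for the three bitwise operations behind Int.land
lemma nat_and_div2 (a b : Nat) : (a &&& b) / 2 = (a / 2) &&& (b / 2) := by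
  apply Nat.eq_of_testBit_eq; intro i
  simp [Nat.testBit_div_two]

lemma nat_ldiff_div2 (a b : Nat) : (a.ldiff b) / 2 = (a / 2).ldiff (b / 2) := by
  apply Nat.eq_of_testBit_eq; intro i
  simp [Nat.testBit_div_two, Nat.testBit_ldiff]

lemma nat_and_odd (a b : Nat) : (a &&& b) % 2 = 1 ↔ (a % 2 = 1 ∧ b % 2 = 1) := by
  have h := Nat.testBit_land a b 0
  simp only [Nat.testBit_zero, ← Bool.decide_and, decide_eq_decide] at h
  exact h

lemma nat_ldiff_odd (a b : Nat) : (a.ldiff b) % 2 = 1 ↔ (a % 2 = 1 ∧ ¬ b % 2 = 1) := by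
  have h := Nat.testBit_ldiff a b 0
  simp only [Nat.testBit_zero, ← decide_not, ← Bool.decide_and, decide_eq_decide] at h
  exact h

lemma nat_or_odd (a b : Nat) : (a ||| b) % 2 = 1 ↔ (a % 2 = 1 ∨ b % 2 = 1) := by
  have h := Nat.testBit_lor a b 0
  simp only [Nat.testBit_zero, ← Bool.decide_or, decide_eq_decide] at h
  exact h

lemma nat_land_add_ldiff (a b : Nat) : (a &&& b) + a.ldiff b = a := by
  induction a using Nat.strong_induction_on generalizing b with
  | _ a IH =>
    by_cases h0 : a = 0
    · subst h0
      have h1 : (0 &&& b) = 0 := Nat.zero_and b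
      have h2 : Nat.ldiff 0 b = 0 := by
        apply Nat.eq_of_testBit_eq; intro i
        simp [Nat.testBit_ldiff]
      omega
    · have hlt : a / 2 < a := Nat.div_lt_self (Nat.pos_of_ne_zero h0) (by norm_num)
      have IH2 := IH (a / 2) hlt (b / 2)
      have e1 := nat_and_div2 a b
      have e2 := nat_ldiff_div2 a b
      have e3 := nat_and_odd a b
      have e4 := nat_ldiff_odd a b
      omega

-- PySem's band is core Int.land
lemma band_eq_land (a b : Int) : PySem.Int.band a b = Int.land a b := by
  cases a with
  | ofNat p =>
    cases b with
    | ofNat q =>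
      show PySem.Int.band (p : Int) (q : Int) = _
      simp [PySem.Int.band, Int.land]
    | negSucc q =>
      show PySem.Int.band (p : Int) (Int.negSucc q) = ((p.ldiff q : Nat) : Int)
      have hq : (-(Int.negSucc q) - 1).toNat = q := by
        simp [Int.negSucc_eq]
      have hsub : p - (p &&& q) = p.ldiff q := by
        have := nat_land_add_ldiff p q; omega
      simp [PySem.Int.band, hsub]
  | negSucc p =>
    cases b with
    | ofNat q =>
      show PySem.Int.band (Int.negSucc p) (q : Int) = ((q.ldiff p : Nat) : Int)
      have hp : (-(Int.negSucc p) - 1).toNat = p := by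
        simp [Int.negSucc_eq]
      have hsub : q - (q &&& p) = q.ldiff p := by
        have := nat_land_add_ldiff q p; omega
      simp [PySem.Int.band, hsub]
    | negSucc q =>
      show PySem.Int.band (Int.negSucc p) (Int.negSucc q) = Int.negSucc (p ||| q)
      have h1 : ¬ (0 ≤ Int.negSucc p) := by rw [Int.negSucc_eq]; omega
      have h2 : ¬ (0 ≤ Int.negSucc q) := by rw [Int.negSucc_eq]; omega
      have hp : (-(Int.negSucc p) - 1).toNat = p := by simp [Int.negSucc_eq]
      have hq : (-(Int.negSucc q) - 1).toNat = q := by simp [Int.negSucc_eq]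
      unfold PySem.Int.band
      rw [if_neg h1, if_neg h2, hp, hq, Int.negSucc_eq]
      ring

-- parity of a bitwise AND: odd iff both arguments are odd
lemma band_odd_iff (a b : Int) :
    PySem.Int.mod (PySem.Int.band a b) 2 = 1 ↔
      (PySem.Int.mod a 2 = 1 ∧ PySem.Int.mod b 2 = 1) := by
  rw [band_eq_land]
  rw [PySem.Int.mod_eq_emod_of_pos (by norm_num),
      PySem.Int.mod_eq_emod_of_pos (a := a) (by norm_num),
      PySem.Int.mod_eq_emod_of_pos (a := b) (by norm_num)]
  cases a with
  | ofNat p =>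
    cases b with
    | ofNat q =>
      show ((p &&& q : Nat) : Int) % 2 = 1 ↔ (((p : Nat) : Int) % 2 = 1 ∧ ((q : Nat) : Int) % 2 = 1)
      have := nat_and_odd p q
      omega
    | negSucc q =>
      show ((p.ldiff q : Nat) : Int) % 2 = 1 ↔ (((p : Nat) : Int) % 2 = 1 ∧ (Int.negSucc q) % 2 = 1)
      have := nat_ldiff_odd p q
      rw [Int.negSucc_eq]
      omega
  | negSucc p =>
    cases b with
    | ofNat q =>
      show ((q.ldiff p : Nat) : Int) % 2 = 1 ↔ ((Int.negSucc p) % 2 = 1 ∧ ((q : Nat) : Int) % 2 = 1)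
      have := nat_ldiff_odd q p
      rw [Int.negSucc_eq]
      omega
    | negSucc q =>
      show (Int.negSucc (p ||| q)) % 2 = 1 ↔ ((Int.negSucc p) % 2 = 1 ∧ (Int.negSucc q) % 2 = 1)
      have := nat_or_odd p q
      rw [Int.negSucc_eq, Int.negSucc_eq, Int.negSucc_eq]
      omega

lemma mod2_cases (a : Int) : PySem.Int.mod a 2 = 0 ∨ PySem.Int.mod a 2 = 1 := by
  have h1 := PySem.Int.mod_nonneg a (b := 2) (by norm_num)
  have h2 := PySem.Int.mod_lt a (b := 2) (by norm_num)
  omega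

-- Nat level: shifts distribute over the three bitwise operations
lemma nat_and_shiftRight (a b k : Nat) : (a &&& b) >>> k = (a >>> k) &&& (b >>> k) := by
  apply Nat.eq_of_testBit_eq; intro i
  simp [Nat.testBit_shiftRight]

lemma nat_ldiff_shiftRight (a b k : Nat) : (a.ldiff b) >>> k = (a >>> k).ldiff (b >>> k) := by
  apply Nat.eq_of_testBit_eq; intro i
  simp [Nat.testBit_shiftRight, Nat.testBit_ldiff]

lemma nat_or_shiftRight (a b k : Nat) : (a ||| b) >>> k = (a >>> k) ||| (b >>> k) := by
  apply Nat.eq_of_testBit_eq; intro i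
  simp [Nat.testBit_shiftRight]

lemma negSucc_shiftRight (p k : Nat) : (Int.negSucc p) >>> k = Int.negSucc (p >>> k) := rfl

-- the right shift distributes over band
lemma band_shiftRight (a b : Int) (k : Nat) :
    (PySem.Int.band a b) >>> k = PySem.Int.band (a >>> k) (b >>> k) := by
  rw [band_eq_land, band_eq_land]
  cases a with
  | ofNat p =>
    cases b with
    | ofNat q =>
      show ((p &&& q : Nat) : Int) >>> k = Int.land ((p : Int) >>> k) ((q : Int) >>> k)
      rw [← Int.natCast_shiftRight, ← Int.natCast_shiftRight, ← Int.natCast_shiftRight,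
          nat_and_shiftRight]
      rfl
    | negSucc q =>
      show ((p.ldiff q : Nat) : Int) >>> k = Int.land ((p : Int) >>> k) ((Int.negSucc q) >>> k)
      rw [← Int.natCast_shiftRight, ← Int.natCast_shiftRight, negSucc_shiftRight,
          nat_ldiff_shiftRight]
      rfl
  | negSucc p =>
    cases b with
    | ofNat q =>
      show ((q.ldiff p : Nat) : Int) >>> k = Int.land ((Int.negSucc p) >>> k) ((q : Int) >>> k)
      rw [← Int.natCast_shiftRight, ← Int.natCast_shiftRight, negSucc_shiftRight,
          nat_ldiff_shiftRight]
      rfl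
    | negSucc q =>
      show (Int.negSucc (p ||| q)) >>> k = Int.land ((Int.negSucc p) >>> k) ((Int.negSucc q) >>> k)
      rw [negSucc_shiftRight, negSucc_shiftRight, negSucc_shiftRight, nat_or_shiftRight]
      rfl

-- product of bit parities is the parity of the AND's bit
lemma mul_mod2_band (a b : Int) (k : Nat) :
    PySem.Int.mod (a >>> k) 2 * PySem.Int.mod (b >>> k) 2
      = PySem.Int.mod ((PySem.Int.band a b) >>> k) 2 := by
  rw [band_shiftRight]
  have h := band_odd_iff (a >>> k) (b >>> k)
  rcases mod2_cases (a >>> k) with h1 | h1 <;>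
    rcases mod2_cases (b >>> k) with h2 | h2 <;>
    rcases mod2_cases (PySem.Int.band (a >>> k) (b >>> k)) with h3 | h3 <;>
    rw [h1, h2] at h <;> rw [h3] at h <;> rw [h1, h2, h3] <;> revert h <;> decide

-- bitCount recurrence for nonnegative integers
lemma bitCount_step (z : Int) (hz : 0 ≤ z) :
    (PySem.Int.bitCount z : Int) = PySem.Int.mod z 2 + (PySem.Int.bitCount (z >>> (1:Nat)) : Int) := by
  rcases eq_or_lt_of_le hz with h | h
  · rw [← h]
    have h0 : ((0:Int) >>> (1:Nat)) = 0 := rfl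
    have hm : PySem.Int.mod 0 2 = 0 := by
      rw [PySem.Int.mod_eq_emod_of_pos (by norm_num)]
      norm_num
    rw [h0, PySem.Int.bitCount_zero, hm]
    simp
  · have hbc := PySem.Int.bitCount_of_pos h
    have hfd : PySem.Int.floordiv z 2 = z >>> (1:Nat) := by
      have h1 : z >>> (1:Nat) = z / 2 := by
        have := Int.shiftRight_eq_div_pow z 1
        simpa using this
      have h2 : PySem.Int.floordiv z 2 = z.fdiv 2 := rfl
      rw [h1, h2, Int.fdiv_eq_ediv]
      simp
    have hnn := PySem.Int.mod_nonneg z (b := 2) (by norm_num)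
    rw [hbc, hfd]
    push_cast
    omega

-- a left-fold of additions over List.range is the range sum
lemma foldl_range_add (g : Nat → Int) (N : Nat) :
    (List.range N).foldl (fun acc k => acc + g k) 0 = ∑ i ∈ Finset.range N, g i := by
  induction N with
  | zero => simp
  | succ N IH =>
    rw [List.range_succ, List.foldl_append, IH, Finset.sum_range_succ]
    rfl

-- w >>> (k : Int) (a cast Nat exponent) is w >>> k
lemma shiftRight_intCast (w : Int) (k : Nat) : w >>> ((k : Nat) : Int) = w >>> k := by
  cases w with
  | ofNat p =>
    show ((p : Nat) : Int) >>> ((k : Nat) : Int) = ((p : Nat) : Int) >>> k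
    rw [Int.shiftRight_natCast, Int.natCast_shiftRight]
  | negSucc p =>
    rw [Int.shiftRight_negSucc, negSucc_shiftRight]

lemma shiftRight_succ_comm (w : Int) (i : Nat) : w >>> (i + 1) = (w >>> (1:Nat)) >>> i := by
  have hnat : ∀ p : Nat, p >>> (i + 1) = p >>> 1 >>> i := by
    intro p
    rw [← Nat.shiftRight_add, Nat.add_comm]
  cases w with
  | ofNat p =>
    show ((p : Nat) : Int) >>> (i+1) = (((p : Nat) : Int) >>> (1:Nat)) >>> i
    rw [← Int.natCast_shiftRight, ← Int.natCast_shiftRight, ← Int.natCast_shiftRight, hnat p]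
  | negSucc p =>
    rw [negSucc_shiftRight, negSucc_shiftRight, negSucc_shiftRight, hnat p]

-- products of bit parities with a cast exponent
lemma mul_mod2_band' (a b : Int) (k : Nat) :
    PySem.Int.mod (a >>> ((k : Nat) : Int)) 2 * PySem.Int.mod (b >>> ((k : Nat) : Int)) 2
      = PySem.Int.mod ((PySem.Int.band a b) >>> k) 2 := by
  rw [shiftRight_intCast, shiftRight_intCast]
  exact mul_mod2_band a b k

-- MAIN: the sum of the low N bit parities is the popcount of the masked value
lemma main_sum (N : Nat) : ∀ w : Int,
    ∑ i ∈ Finset.range N, PySem.Int.mod (w >>> i) 2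
      = (PySem.Int.bitCount (PySem.Int.band w ((2:Int) ^ N - 1)) : Int) := by
  induction N with
  | zero =>
    intro w
    have h1 : (2:Int) ^ (0:Nat) - 1 = 0 := by norm_num
    rw [h1, PySem.Int.band_zero, PySem.Int.bitCount_zero]
    simp
  | succ N IH =>
    intro w
    have h2N : (0:Int) < 2 ^ N := by positivity
    have h2S : (2:Int) ^ (N+1) = 2 * 2 ^ N := by ring
    have hmask_nn : (0:Int) ≤ (2:Int) ^ (N+1) - 1 := by omega
    have hz : 0 ≤ PySem.Int.band w ((2:Int) ^ (N+1) - 1) := by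
      rw [PySem.Int.band_comm]
      exact PySem.Int.band_nonneg_of_nonneg_left w hmask_nn
    have hModM : PySem.Int.mod ((2:Int) ^ (N+1) - 1) 2 = 1 := by
      rw [PySem.Int.mod_eq_emod_of_pos (by norm_num)]
      omega
    have hz_mod : PySem.Int.mod (PySem.Int.band w ((2:Int) ^ (N+1) - 1)) 2 = PySem.Int.mod w 2 := by
      have h := band_odd_iff w ((2:Int) ^ (N+1) - 1)
      rw [hModM] at h
      rcases mod2_cases (PySem.Int.band w ((2:Int) ^ (N+1) - 1)) with h2 | h2 <;>
        rcases mod2_cases w with hw | hw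
      · rw [h2, hw]
      · exfalso
        have := h.mpr ⟨hw, rfl⟩
        omega
      · exfalso
        have := (h.mp h2).1
        omega
      · rw [h2, hw]
    have hz_shift : (PySem.Int.band w ((2:Int) ^ (N+1) - 1)) >>> (1:Nat)
        = PySem.Int.band (w >>> (1:Nat)) ((2:Int) ^ N - 1) := by
      rw [band_shiftRight]
      congr 1
      have hMd : ((2:Int) ^ (N+1) - 1) >>> (1:Nat) = ((2:Int) ^ (N+1) - 1) / 2 := by
        have := Int.shiftRight_eq_div_pow ((2:Int) ^ (N+1) - 1) 1
        simpa using this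
      rw [hMd]
      omega
    rw [Finset.sum_range_succ']
    have hterms : ∀ i ∈ Finset.range N,
        PySem.Int.mod (w >>> (i+1)) 2 = PySem.Int.mod ((w >>> (1:Nat)) >>> i) 2 := by
      intro i _
      rw [shiftRight_succ_comm]
    rw [Finset.sum_congr rfl hterms, IH (w >>> (1:Nat))]
    have hw0 : w >>> (0:Nat) = w := by cases w <;> rfl
    rw [hw0, bitCount_step (PySem.Int.band w ((2:Int) ^ (N+1) - 1)) hz, hz_mod, hz_shift]
    ring

-- one side of A equals the corresponding side of B
lemma side_eq (a b : Int) (n : Int) :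
    PySem.Int.mod ((PySem.List.pyRange 0 n 1).foldl
      (fun acc i => acc + PySem.Int.band (a >>> i.toNat) 1 * PySem.Int.band (b >>> i.toNat) 1) 0) 2
    = PySem.Int.mod (PySem.Int.bitCount (PySem.Int.band (PySem.Int.band a b) ((1 <<< (max n 0).toNat) - 1)) : Int) 2 := by
  have hN : (max n 0).toNat = n.toNat := by omega
  rw [hN, PySem.List.pyRange_one, List.foldl_map]
  simp only [zero_add, Int.toNat_natCast, sub_zero]
  simp only [PySem.Int.band_one]
  simp only [mul_mod2_band']
  rw [foldl_range_add (fun k => PySem.Int.mod ((PySem.Int.band a b) >>> k) 2) n.toNat,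
      main_sum n.toNat (PySem.Int.band a b)]
  rw [show ((1 <<< n.toNat : Nat) : Int) = (2:Int) ^ n.toNat by
        rw [Nat.one_shiftLeft]; push_cast; ring]

-- ===== VERDICT (by name: the statement is the Claim_ definition above) =====
theorem vector_inner_product_spec : Claim_equal_vector_inner_product := by
  intro u v x fx n m _
  unfold Spec_vector_inner_product
  simp only [vector_inner_product, vector_inner_product_alt]
  rw [side_eq u x n, side_eq v fx m]
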